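-- pv_equiv track=rewrite | github.com/ZAIFI-BUSINESS-SOLUTIONS-PVT-LTD/B2C_CBT_Platform | backend/neet_app/views/insights_views.py | is_valid_insight
-- ===== SOURCE A (Python) =====
-- def is_valid_insight(insight):
--     """
--     Check if an insight is valid (not a fallback/placeholder message).
--
--     Args:
--         insight: String to validate
--
--     Returns:
--         bool: True if valid, False if fallback/placeholder
--     """
--     if not insight or not isinstance(insight, str):
--         return False
--
--     insight_lower = insight.lower().strip()
--
--     # Filter out insights that are too short
--     if len(insight_lower) < 10:
--         return False
--
--     # Fallback phrases to exclude (case-insensitive)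
--     fallback_phrases = [
--         'no data',
--         'insufficient',
--         'insufficient data',
--         'continue practicing',
--         'additional analysis needed',
--         'no insights',
--         'not available',
--         'not enough',
--         'not sufficient',
--         'no test data',
--         'complete more',
--         'for better insights',
--         'no analysis',
--         'unavailable',
--         'take more tests',
--         'attempt more',
--     ]
--
--     # Check if any fallback phrase is present
--     for phrase in fallback_phrases:
--         if phrase in insight_lower:
--             return False
--
--     return True
-- ===== SOURCE B (Python) =====
-- _FALLBACK_PHRASES = (
--     'no data',
--     'insufficient',
--     'insufficient data',
--     'continue practicing',
--     'additional analysis needed',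
--     'no insights',
--     'not available',
--     'not enough',
--     'not sufficient',
--     'no test data',
--     'complete more',
--     'for better insights',
--     'no analysis',
--     'unavailable',
--     'take more tests',
--     'attempt more',
-- )
--
--
-- def is_valid_insight(insight):
--     if not insight or not isinstance(insight, str):
--         return False
--     insight_lower = insight.lower().strip()
--     if len(insight_lower) < 10:
--         return False
--     # single left-to-right pass: at each position ask whether any fallback
--     # phrase starts exactly here, instead of one full substring scan per phrase
--     return not any(
--         insight_lower.startswith(p, i)
--         for i in range(len(insight_lower))
--         for p in _FALLBACK_PHRASES
--     )
-- ===== Notes on version B (the rewrite author's own statement) =====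
-- stated objective: alternative
-- what changed: Replaces the sixteen separate full substring scans ('phrase in s' per phrase) with a single left-to-right pass over string positions that checks at each position whether any fallback phrase starts there (startswith with an offset).
import Mathlib
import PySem

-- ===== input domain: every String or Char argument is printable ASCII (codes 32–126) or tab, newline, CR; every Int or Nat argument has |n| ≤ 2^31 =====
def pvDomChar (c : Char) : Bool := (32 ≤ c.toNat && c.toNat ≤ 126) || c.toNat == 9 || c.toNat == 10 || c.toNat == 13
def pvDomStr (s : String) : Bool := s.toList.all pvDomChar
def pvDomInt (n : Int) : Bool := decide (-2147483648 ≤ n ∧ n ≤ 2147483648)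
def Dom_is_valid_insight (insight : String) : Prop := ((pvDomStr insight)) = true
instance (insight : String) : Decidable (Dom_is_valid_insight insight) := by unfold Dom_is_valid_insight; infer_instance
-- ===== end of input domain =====

-- B replaces A's sixteen separate full substring scans with one left-to-right pass
-- over positions testing whether any fallback phrase starts there (alternative algorithm).


-- ===== PORT A =====
-- the fallback phrase list (shared data constant)
def pvFallbackPhrases : List String :=
  ["no data", "insufficient", "insufficient data", "continue practicing",
   "additional analysis needed", "no insights", "not available", "not enough",
   "not sufficient", "no test data", "complete more", "for better insights",
   "no analysis", "unavailable", "take more tests", "attempt more"]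

def is_valid_insight (insight : String) : Bool :=
  if insight == "" then false
  else
    let insight_lower := PySem.Str.strip (PySem.Str.lower insight)
    if PySem.Str.len insight_lower < 10 then false
    else
      -- 'for phrase in fallback_phrases: if phrase in insight_lower: return False' / 'return True'
      !(pvFallbackPhrases.any (fun phrase => PySem.Str.isIn phrase insight_lower))

-- ===== PORT B =====
-- s.startswith(p, i) for 0 ≤ i: exact, Python checks p against s at offset i
def pvStartswithAt (cs p : List Char) (i : Nat) : Bool := PySem.Chars.startswith (cs.drop i) p

def is_valid_insight_alt (insight : String) : Bool :=
  if insight == "" then false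
  else
    let insight_lower := PySem.Str.strip (PySem.Str.lower insight)
    if PySem.Str.len insight_lower < 10 then false
    else
      -- not any(insight_lower.startswith(p, i) for i in range(len) for p in phrases)
      !((PySem.List.pyRange 0 (PySem.Str.len insight_lower) 1).any (fun i =>
          pvFallbackPhrases.any (fun p => pvStartswithAt insight_lower.toList p.toList i.toNat)))

-- ===== PRECONDITION & SPEC =====
def Spec_is_valid_insight (insight : String) (out : Bool) : Prop := out = is_valid_insight_alt insight
instance (insight : String) (out : Bool) : Decidable (Spec_is_valid_insight insight out) := by unfold Spec_is_valid_insight; infer_instance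

-- ===== CLAIM (what is proved, stated in full; the proofs are below) =====
def Claim_equal_is_valid_insight : Prop := ∀ (insight : String), Dom_is_valid_insight insight → Spec_is_valid_insight insight (is_valid_insight insight)

-- ===== LEMMAS AND PROOFS =====

theorem pvPhrases_ne_nil : ∀ p ∈ pvFallbackPhrases, p.toList ≠ [] := by decide

-- a nonempty pattern occurs in cs iff it is a prefix of some proper drop of cs
theorem pvIsIn_iff_exists_lt (p cs : List Char) (hp : p ≠ []) :
    PySem.Chars.isIn p cs = true ↔ ∃ j : Nat, j < cs.length ∧ p <+: cs.drop j := by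
  rw [← PySem.Chars.exists_prefix_drop_iff_isIn]
  constructor
  · rintro ⟨j, hj⟩
    refine ⟨j, ?_, hj⟩
    by_contra h
    push Not at h
    rw [List.drop_eq_nil_of_le h] at hj
    exact hp (List.prefix_nil.mp hj)
  · rintro ⟨j, _, hj⟩
    exact ⟨j, hj⟩

theorem pvAny_eq (il : String) :
    pvFallbackPhrases.any (fun phrase => PySem.Str.isIn phrase il)
      = (PySem.List.pyRange 0 (PySem.Str.len il) 1).any (fun i =>
          pvFallbackPhrases.any (fun p => pvStartswithAt il.toList p.toList i.toNat)) := by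
  rw [Bool.eq_iff_iff]
  simp only [List.any_eq_true, PySem.Str.isIn_eq, pvStartswithAt,
    PySem.Chars.startswith_iff, PySem.List.mem_pyRange_one, PySem.Str.len_eq]
  constructor
  · rintro ⟨p, hpmem, hin⟩
    obtain ⟨j, hjlt, hjpre⟩ :=
      (pvIsIn_iff_exists_lt p.toList il.toList (pvPhrases_ne_nil p hpmem)).mp hin
    refine ⟨(j : Int), ⟨by positivity, by exact_mod_cast hjlt⟩, p, hpmem, ?_⟩
    simpa using hjpre
  · rintro ⟨i, ⟨hi0, hilt⟩, p, hpmem, hpre⟩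
    refine ⟨p, hpmem, ?_⟩
    exact (PySem.Chars.exists_prefix_drop_iff_isIn _ _).mp ⟨i.toNat, hpre⟩

-- ===== VERDICT (by name: the statement is the Claim_ definition above) =====
set_option maxHeartbeats 1000000 in
theorem is_valid_insight_spec : Claim_equal_is_valid_insight := by
  intro insight _
  show is_valid_insight insight = is_valid_insight_alt insight
  simp only [is_valid_insight, is_valid_insight_alt]
  split_ifs
  · rfl
  · rfl
  · exact congrArg (fun b => !b) (pvAny_eq _)
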